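-- pv_equiv track=rewrite | github.com/syanh2512/retrieval | assign4/main.py | make_adja_matrix
-- ===== SOURCE A (Python) =====
-- cols = 5
--
-- def make_adja_matrix(data):
--     adja_matrix = []
--     for row in data:
--         while len(row) < cols:
--             row.append(0)
--         fr_row = [0]*cols
--         for i in range(cols):
--             count = 0
--             for j in range(cols):
--                 if int(row[j]) == i+1:
--                     count +=1
--             fr_row[i] = count
--         adja_matrix.append(fr_row)
--     return adja_matrix
-- ===== SOURCE B (Python) =====
-- cols = 5
--
-- def make_adja_matrix(data):
--     # single pass per row: each column value drops into its bucket once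
--     adja_matrix = []
--     for row in data:
--         while len(row) < cols:
--             row.append(0)
--         fr_row = [0] * cols
--         for v in row[:cols]:
--             v = int(v)
--             if 1 <= v <= cols:
--                 fr_row[v - 1] += 1
--         adja_matrix.append(fr_row)
--     return adja_matrix
-- ===== Notes on version B (the rewrite author's own statement) =====
-- stated objective: faster
-- what changed: Replaces the nested value-by-column double loop (for each of the 5 values, rescan all 5 columns) with a single pass over the row's first 5 columns that increments bucket v-1 once per column; both versions keep the in-place padding of the row.
import Mathlib
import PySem

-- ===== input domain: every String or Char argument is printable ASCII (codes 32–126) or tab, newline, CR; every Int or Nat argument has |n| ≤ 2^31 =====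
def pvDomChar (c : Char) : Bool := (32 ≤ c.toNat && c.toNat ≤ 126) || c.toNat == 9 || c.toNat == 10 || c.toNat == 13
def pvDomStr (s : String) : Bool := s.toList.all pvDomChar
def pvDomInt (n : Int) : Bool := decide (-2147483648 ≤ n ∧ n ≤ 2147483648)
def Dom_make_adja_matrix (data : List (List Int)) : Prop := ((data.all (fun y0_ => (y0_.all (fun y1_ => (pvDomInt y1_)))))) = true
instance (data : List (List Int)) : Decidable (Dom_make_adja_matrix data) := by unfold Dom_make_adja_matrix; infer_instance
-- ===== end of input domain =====

-- B replaces A's value-by-column double loop with one bucket-counting pass over each row's first 5 columns (same result).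
-- NOTE: the Python A (and B alike) pads each row in place; the equivalence proved here is about the return value.

-- ===== PORT A =====
-- `while len(row) < cols: row.append(0)`
def pvPadRow (row : List Int) : List Int :=
  if row.length < 5 then pvPadRow (row ++ [0]) else row
termination_by 5 - row.length
decreasing_by simp [List.length_append]; omega

-- inner `count = 0; for j in range(cols): if int(row[j]) == i+1: count += 1`
def pvACount (row : List Int) (i : Nat) : Int :=
  (List.range 5).foldl
    (fun (count : Int) (j : Nat) =>
      if PySem.List.pyGet? row (j : Int) = some ((i : Int) + 1) then count + 1 else count) 0

def make_adja_matrix (data : List (List Int)) : List (List Int) :=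
  data.foldl
    (fun adja_matrix row =>
      let row := pvPadRow row
      adja_matrix ++ [(List.range 5).map (fun i => pvACount row i)])
    []

-- ===== PORT B =====
-- body of `for v in row[:cols]: if 1 <= v <= cols: fr_row[v-1] += 1`
def pvBStep (fr : List Int) (v : Int) : List Int :=
  if 1 ≤ v ∧ v ≤ 5 then fr.set (v - 1).toNat (fr.getD (v - 1).toNat 0 + 1) else fr
  -- (v-1).toNat is exact here: the guard makes 0 ≤ v-1 ≤ 4, an ordinary nonnegative index

def pvBRow (row : List Int) : List Int :=
  ((pvPadRow row).take 5).foldl pvBStep (List.replicate 5 0)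

def make_adja_matrix_alt (data : List (List Int)) : List (List Int) :=
  data.foldl (fun adja_matrix row => adja_matrix ++ [pvBRow row]) []

-- ===== PRECONDITION & SPEC =====
def Spec_make_adja_matrix (data : List (List Int)) (out : List (List Int)) : Prop := out = make_adja_matrix_alt data
instance (data : List (List Int)) (out : List (List Int)) : Decidable (Spec_make_adja_matrix data out) := by unfold Spec_make_adja_matrix; infer_instance

-- ===== CLAIM (what is proved, stated in full; the proofs are below) =====
def Claim_equal_make_adja_matrix : Prop := ∀ (data : List (List Int)), Dom_make_adja_matrix data → Spec_make_adja_matrix data (make_adja_matrix data)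

-- ===== LEMMAS AND PROOFS =====

theorem pvPadRow_length (r : List Int) : 5 ≤ (pvPadRow r).length := by
  rw [pvPadRow]
  split
  · exact pvPadRow_length (r ++ [0])
  · omega
termination_by 5 - r.length
decreasing_by simp [List.length_append]; omega

theorem pvBStep_length (fr : List Int) (v : Int) : (pvBStep fr v).length = fr.length := by
  unfold pvBStep; split <;> simp

theorem foldl_pvBStep_length (l : List Int) (fr : List Int) :
    (l.foldl pvBStep fr).length = fr.length := by
  induction l generalizing fr with
  | nil => rfl
  | cons v t ih => simp [List.foldl, ih, pvBStep_length]

theorem pvBStep_getD (fr : List Int) (v : Int) (i : Nat) (hf : fr.length = 5) (hi : i < 5) :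
    (pvBStep fr v).getD i 0 = fr.getD i 0 + (if v = (i : Int) + 1 then 1 else 0) := by
  unfold pvBStep
  split
  · rename_i hv
    by_cases hvi : v = (i : Int) + 1
    · have hk : (v - 1).toNat = i := by omega
      simp [hvi, List.getD, hf, hi]
    · have hk : v.toNat - 1 ≠ i := by omega
      simp [List.getD, hvi, List.getElem?_set_ne hk]
  · rename_i hv
    have : v ≠ (i : Int) + 1 := by omega
    simp [this]

theorem foldl_pvBStep_getD (l : List Int) (fr : List Int) (i : Nat)
    (hf : fr.length = 5) (hi : i < 5) :
    (l.foldl pvBStep fr).getD i 0 = fr.getD i 0 + (l.count ((i : Int) + 1) : Int) := by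
  induction l generalizing fr with
  | nil => simp
  | cons v t ih =>
      have hfl : (pvBStep fr v).length = 5 := by rw [pvBStep_length]; exact hf
      simp only [List.foldl, ih (pvBStep fr v) hfl, pvBStep_getD fr v i hf hi,
        List.count_cons]
      by_cases h : v = (i : Int) + 1 <;> simp [h] <;> ring_nf

theorem len5_ext (l : List Int) (h : l.length = 5) :
    l = [l.getD 0 0, l.getD 1 0, l.getD 2 0, l.getD 3 0, l.getD 4 0] := by
  match l, h with
  | [a, b, c, d, e], _ => rfl

theorem fold_pyGet_count (l : List Int) (x : Int) (n : Nat) (h : n ≤ l.length) :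
    (List.range n).foldl
        (fun (c : Int) (j : Nat) => if PySem.List.pyGet? l (j : Int) = some x then c + 1 else c) 0
      = ((l.take n).count x : Int) := by
  induction n with
  | zero => simp
  | succ m ih =>
      have hm : m < l.length := by omega
      rw [List.range_succ, List.foldl_append, List.foldl_cons, List.foldl_nil, ih (by omega)]
      rw [PySem.List.pyGet?_natCast, List.getElem?_eq_getElem hm, List.take_add_one]
      simp only [List.getElem?_eq_getElem hm, Option.toList_some, List.count_append,
        List.count_cons, List.count_nil, Option.some.injEq]
      by_cases hx : l[m] = x <;> simp [hx] <;> ring_nf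

theorem pvACount_eq_count (p : List Int) (h : 5 ≤ p.length) (i : Nat) :
    pvACount p i = ((p.take 5).count ((i : Int) + 1) : Int) := by
  exact fold_pyGet_count p ((i : Int) + 1) 5 h

theorem row_eq (row : List Int) :
    (List.range 5).map (fun i => pvACount (pvPadRow row) i) = pvBRow row := by
  have hlen : 5 ≤ (pvPadRow row).length := pvPadRow_length row
  have hB : (((pvPadRow row).take 5).foldl pvBStep (List.replicate 5 0)).length = 5 := by
    rw [foldl_pvBStep_length]; rfl
  have hg : ∀ i : Nat, i < 5 →
      (((pvPadRow row).take 5).foldl pvBStep (List.replicate 5 0)).getD i 0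
        = (((pvPadRow row).take 5).count ((i : Int) + 1) : Int) := by
    intro i hi
    rw [foldl_pvBStep_getD _ _ _ (by rfl) hi]
    have h0 : (List.replicate 5 (0 : Int)).getD i 0 = 0 := by
      interval_cases i <;> rfl
    rw [h0]; ring
  unfold pvBRow
  rw [len5_ext _ hB]
  rw [hg 0 (by omega), hg 1 (by omega), hg 2 (by omega), hg 3 (by omega), hg 4 (by omega)]
  simp [List.range_succ, pvACount_eq_count _ hlen]

theorem foldl_append_eq_map {α β : Type} (f : α → β) (l : List α) (acc : List β) :
    l.foldl (fun a r => a ++ [f r]) acc = acc ++ l.map f := by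
  induction l generalizing acc with
  | nil => simp
  | cons x t ih => simp [List.foldl, ih]

-- ===== VERDICT (by name: the statement is the Claim_ definition above) =====
theorem make_adja_matrix_spec : Claim_equal_make_adja_matrix := by
  intro data _
  unfold Spec_make_adja_matrix make_adja_matrix make_adja_matrix_alt
  rw [foldl_append_eq_map (fun row => (List.range 5).map (fun i => pvACount (pvPadRow row) i)),
      foldl_append_eq_map pvBRow]
  simp only [List.nil_append]
  exact List.map_congr_left (fun row _ => row_eq row)
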